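-- pv_equiv track=rewrite | github.com/ayush0286/leetcode | rearranging-fruits.py | populateDiscardPiles
-- ===== SOURCE A (Python) =====
-- def populateDiscardPiles(values):
--     discard1 = []
--     discard2 = []
--     for key in values:
--         value = values[key]
--         if abs(value) % 2 != 0:
--             return [None, None]
--         if value < 0:
--             for index in range(abs(value) // 2):
--                 discard2.append(key)
--         elif value > 0:
--             for index in range(value // 2):
--                 discard1.append(key)
--     discard1.sort()
--     discard2.sort()
--     return [discard1, discard2]
-- ===== SOURCE B (Python) =====
-- def populateDiscardPiles(values):
--     # Insertion-sort the dict items into ONE ordered association list (no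
--     # list.sort calls), then a single walk over it emits both piles in order.
--     ordered = []
--     for key, value in values.items():
--         if value % 2:
--             return [None, None]
--         ordered = _insert_by_key(ordered, key, value)
--     d1, d2 = [], []
--     for key, value in ordered:
--         if value > 0:
--             d1 += [key] * (value // 2)
--         elif value < 0:
--             d2 += [key] * (-value // 2)
--     return [d1, d2]
--
--
-- def _insert_by_key(items, key, value):
--     if not items or key < items[0][0]:
--         return [(key, value)] + items
--     return items[:1] + _insert_by_key(items[1:], key, value)
-- ===== Notes on version B (the rewrite author's own statement) =====
-- stated objective: alternative
-- what changed: A expands every key into two piles and then sorts the expanded piles with list.sort; B never calls sort: it insertion-sorts the (key, value) items into one ordered association list and a single final walk over that list emits both piles already in order.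
import Mathlib
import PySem

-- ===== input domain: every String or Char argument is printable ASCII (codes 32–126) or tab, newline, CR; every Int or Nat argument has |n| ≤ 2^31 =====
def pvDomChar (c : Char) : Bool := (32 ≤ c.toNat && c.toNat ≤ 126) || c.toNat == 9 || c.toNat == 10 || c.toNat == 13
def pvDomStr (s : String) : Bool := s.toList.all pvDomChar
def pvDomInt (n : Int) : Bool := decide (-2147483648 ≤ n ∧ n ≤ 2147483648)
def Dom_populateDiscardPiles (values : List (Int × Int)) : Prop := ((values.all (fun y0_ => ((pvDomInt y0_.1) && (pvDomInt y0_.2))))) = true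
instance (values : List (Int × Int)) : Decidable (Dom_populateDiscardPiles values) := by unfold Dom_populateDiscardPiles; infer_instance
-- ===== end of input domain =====

-- B never calls sort: it insertion-sorts the items into one ordered association
-- list and emits both piles from a single final walk (objective: alternative).

-- ===== PORT A =====
-- A's loop over the dict's keys; `values[key]` always finds the key (it ranges over
-- the dict's own keys), ported as `d.getD k 0` (exact here: the key is present).
def populateDiscardPilesGo (d : PySem.Dict Int Int) :
    List Int → List Int → List Int → List (Option (List Int))
  | [], d1, d2 =>
      [some (PySem.List.sorted d1 (fun x => x) false),
       some (PySem.List.sorted d2 (fun x => x) false)]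
  | k :: ks, d1, d2 =>
      let v := d.getD k 0
      if PySem.Int.mod |v| 2 ≠ 0 then [none, none]
      else if v < 0 then
        populateDiscardPilesGo d ks d1
          ((PySem.List.pyRange 0 (PySem.Int.floordiv |v| 2) 1).foldl (fun acc _ => acc ++ [k]) d2)
      else if v > 0 then
        populateDiscardPilesGo d ks
          ((PySem.List.pyRange 0 (PySem.Int.floordiv v 2) 1).foldl (fun acc _ => acc ++ [k]) d1) d2
      else populateDiscardPilesGo d ks d1 d2

def populateDiscardPiles (values : List (Int × Int)) : List (Option (List Int)) :=
  let d := PySem.Dict.ofList values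
  populateDiscardPilesGo d d.keys [] []

-- ===== PORT B =====
-- _insert_by_key: recursive insertion into the ordered association list
def pvInsertByKey : List (Int × Int) → Int → Int → List (Int × Int)
  | [], key, value => [(key, value)]
  | x :: xs, key, value =>
      if key < x.1 then (key, value) :: x :: xs
      else x :: pvInsertByKey xs key value

-- the second loop of Source B: one walk emitting both piles
def pvEmit : List (Int × Int) → List Int → List Int → List Int × List Int
  | [], d1, d2 => (d1, d2)
  | (k, v) :: rest, d1, d2 =>
      if v > 0 then pvEmit rest (d1 ++ List.replicate (PySem.Int.floordiv v 2).toNat k) d2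
      else if v < 0 then pvEmit rest d1 (d2 ++ List.replicate (PySem.Int.floordiv (-v) 2).toNat k)
      else pvEmit rest d1 d2

-- the first loop of Source B: parity check + insertion-sort into `ordered`
def populateDiscardPilesAltGo : List (Int × Int) → List (Int × Int) → List (Option (List Int))
  | [], ordered =>
      let p := pvEmit ordered [] []
      [some p.1, some p.2]
  | (k, v) :: rest, ordered =>
      if PySem.Int.mod v 2 ≠ 0 then [none, none]
      else populateDiscardPilesAltGo rest (pvInsertByKey ordered k v)

def populateDiscardPiles_alt (values : List (Int × Int)) : List (Option (List Int)) :=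
  populateDiscardPilesAltGo (PySem.Dict.ofList values).items []

-- ===== PRECONDITION & SPEC =====
def Spec_populateDiscardPiles (values : List (Int × Int)) (out : List (Option (List Int))) : Prop := out = populateDiscardPiles_alt values
instance (values : List (Int × Int)) (out : List (Option (List Int))) : Decidable (Spec_populateDiscardPiles values out) := by unfold Spec_populateDiscardPiles; infer_instance

-- ===== CLAIM (what is proved, stated in full; the proofs are below) =====
def Claim_equal_populateDiscardPiles : Prop := ∀ (values : List (Int × Int)), Dom_populateDiscardPiles values → Spec_populateDiscardPiles values (populateDiscardPiles values)

-- ===== LEMMAS AND PROOFS =====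

def pvF1 (d : PySem.Dict Int Int) (k : Int) : List Int :=
  if d.getD k 0 > 0 then List.replicate (PySem.Int.floordiv (d.getD k 0) 2).toNat k else []

def pvF2 (d : PySem.Dict Int Int) (k : Int) : List Int :=
  if d.getD k 0 < 0 then List.replicate (PySem.Int.floordiv (-(d.getD k 0)) 2).toNat k else []

def pvG1 (p : Int × Int) : List Int :=
  if p.2 > 0 then List.replicate (PySem.Int.floordiv p.2 2).toNat p.1 else []

def pvG2 (p : Int × Int) : List Int :=
  if p.2 < 0 then List.replicate (PySem.Int.floordiv (-p.2) 2).toNat p.1 else []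

theorem foldl_append_const {α β : Type} (l : List α) (k : β) (init : List β) :
    l.foldl (fun acc _ => acc ++ [k]) init = init ++ List.replicate l.length k := by
  induction l generalizing init with
  | nil => simp
  | cons x xs ih => simp [List.foldl, ih, List.replicate_succ, List.append_assoc]

theorem pairwise_flatMap_le {α : Type} [Preorder α] (f : α → List α)
    (hf : ∀ k, ∀ x ∈ f k, x = k) :
    ∀ (ks : List α), ks.Pairwise (· ≤ ·) → (ks.flatMap f).Pairwise (· ≤ ·) := by
  intro ks h
  induction h with
  | nil => simp
  | @cons k ks hk _ ih =>
    rw [List.flatMap_cons, List.pairwise_append]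
    refine ⟨?_, ih, ?_⟩
    · exact List.pairwise_of_forall_mem_list
        (fun a ha b hb => by rw [hf k a ha, hf k b hb])
    · intro a ha b hb
      obtain ⟨j, hj, hbj⟩ := List.mem_flatMap.mp hb
      rw [hf k a ha, hf j b hbj]
      exact hk j hj

theorem populateDiscardPilesGo_none (d : PySem.Dict Int Int) (ks : List Int) (d1 d2 : List Int)
    (h : ∃ k ∈ ks, PySem.Int.mod |d.getD k 0| 2 ≠ 0) :
    populateDiscardPilesGo d ks d1 d2 = [none, none] := by
  induction ks generalizing d1 d2 with
  | nil => simp at h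
  | cons k ks ih =>
    obtain ⟨j, hj, hodd⟩ := h
    rw [populateDiscardPilesGo]
    rcases List.mem_cons.mp hj with rfl | hj
    · rw [if_pos hodd]
    · by_cases hk : PySem.Int.mod |d.getD k 0| 2 ≠ 0
      · rw [if_pos hk]
      · rw [if_neg hk]
        split_ifs <;> exact ih _ _ ⟨j, hj, hodd⟩

theorem populateDiscardPilesGo_even (d : PySem.Dict Int Int) (ks : List Int)
    (h : ∀ k ∈ ks, PySem.Int.mod |d.getD k 0| 2 = 0) (d1 d2 : List Int) :
    populateDiscardPilesGo d ks d1 d2 =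
      [some (PySem.List.sorted (d1 ++ ks.flatMap (pvF1 d)) (fun x => x) false),
       some (PySem.List.sorted (d2 ++ ks.flatMap (pvF2 d)) (fun x => x) false)] := by
  induction ks generalizing d1 d2 with
  | nil => simp [populateDiscardPilesGo]
  | cons k ks ih =>
    have heven := h k (List.mem_cons_self ..)
    have hrest : ∀ j ∈ ks, PySem.Int.mod |d.getD j 0| 2 = 0 := fun j hj => h j (List.mem_cons_of_mem _ hj)
    rw [populateDiscardPilesGo]
    simp only [heven, ne_eq, not_true_eq_false, not_false_eq_true, if_neg]
    by_cases hneg : d.getD k 0 < 0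
    · rw [if_pos hneg, ih hrest, foldl_append_const]
      have hlen : (PySem.List.pyRange 0 (PySem.Int.floordiv |d.getD k 0| 2) 1).length
          = (PySem.Int.floordiv (-(d.getD k 0)) 2).toNat := by
        have : |d.getD k 0| = -(d.getD k 0) := abs_of_neg hneg
        rw [this, PySem.List.length_pyRange_one]
        simp
      rw [hlen]
      have h1 : pvF1 d k = [] := by simp [pvF1]; omega
      have h2 : pvF2 d k = List.replicate (PySem.Int.floordiv (-(d.getD k 0)) 2).toNat k := by
        simp [pvF2, hneg]
      simp [h1, h2]
    · rw [if_neg hneg]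
      by_cases hpos : d.getD k 0 > 0
      · rw [if_pos hpos, ih hrest, foldl_append_const]
        have hlen : (PySem.List.pyRange 0 (PySem.Int.floordiv (d.getD k 0) 2) 1).length
            = (PySem.Int.floordiv (d.getD k 0) 2).toNat := by
          rw [PySem.List.length_pyRange_one]
          simp
        rw [hlen]
        have h1 : pvF1 d k = List.replicate (PySem.Int.floordiv (d.getD k 0) 2).toNat k := by
          simp [pvF1, hpos]
        have h2 : pvF2 d k = [] := by simp [pvF2]; omega
        simp [h1, h2]
      · rw [if_neg hpos, ih hrest]
        have h1 : pvF1 d k = [] := by simp [pvF1]; omega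
        have h2 : pvF2 d k = [] := by simp [pvF2]; omega
        simp [h1, h2]

theorem sorted_flatMap_keys (d : PySem.Dict Int Int) (f : Int → List Int)
    (hf : ∀ k, ∀ x ∈ f k, x = k) :
    PySem.List.sorted (d.keys.flatMap f) (fun x => x) false
      = (PySem.List.sorted d.keys (fun x => x) false).flatMap f := by
  apply PySem.List.sorted_id_eq_of_perm_of_pairwise
  · exact (PySem.List.sorted_perm d.keys (fun x => x) false).flatMap (fun a _ => List.Perm.refl (f a))
  · exact pairwise_flatMap_le f hf _
      (by simpa using PySem.List.sorted_pairwise d.keys (fun x => x))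

-- B-side lemmas

theorem pvEmit_eq (l : List (Int × Int)) (d1 d2 : List Int) :
    pvEmit l d1 d2 = (d1 ++ l.flatMap pvG1, d2 ++ l.flatMap pvG2) := by
  induction l generalizing d1 d2 with
  | nil => simp [pvEmit]
  | cons p ps ih =>
    obtain ⟨k, v⟩ := p
    rw [pvEmit]
    by_cases hpos : v > 0
    · rw [if_pos hpos, ih]
      have h1 : pvG1 (k, v) = List.replicate (PySem.Int.floordiv v 2).toNat k := by simp [pvG1, hpos]
      have h2 : pvG2 (k, v) = [] := by simp [pvG2]; omega
      simp [h1, h2]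
    · rw [if_neg hpos]
      by_cases hneg : v < 0
      · rw [if_pos hneg, ih]
        have h1 : pvG1 (k, v) = [] := by simp [pvG1]; omega
        have h2 : pvG2 (k, v) = List.replicate (PySem.Int.floordiv (-v) 2).toNat k := by simp [pvG2, hneg]
        simp [h1, h2]
      · rw [if_neg hneg, ih]
        have h1 : pvG1 (k, v) = [] := by simp [pvG1]; omega
        have h2 : pvG2 (k, v) = [] := by simp [pvG2]; omega
        simp [h1, h2]

theorem pvInsertByKey_perm (xs : List (Int × Int)) (k v : Int) :
    (pvInsertByKey xs k v).Perm ((k, v) :: xs) := by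
  induction xs with
  | nil => simp [pvInsertByKey]
  | cons x xs ih =>
    rw [pvInsertByKey]
    by_cases h : k < x.1
    · rw [if_pos h]
    · rw [if_neg h]
      exact (ih.cons x).trans (List.Perm.swap _ _ _)

theorem pvInsertByKey_pairwise (xs : List (Int × Int)) (k v : Int)
    (h : xs.Pairwise (fun p q => p.1 ≤ q.1)) :
    (pvInsertByKey xs k v).Pairwise (fun p q => p.1 ≤ q.1) := by
  induction xs with
  | nil => simp [pvInsertByKey]
  | cons x xs ih =>
    rw [pvInsertByKey]
    rcases List.pairwise_cons.mp h with ⟨hx, hxs⟩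
    by_cases hk : k < x.1
    · rw [if_pos hk]
      refine List.pairwise_cons.mpr ⟨?_, h⟩
      intro q hq
      rcases List.mem_cons.mp hq with rfl | hq
      · exact le_of_lt hk
      · exact le_trans (le_of_lt hk) (hx q hq)
    · rw [if_neg hk]
      refine List.pairwise_cons.mpr ⟨?_, ih hxs⟩
      intro q hq
      rcases List.mem_cons.mp ((pvInsertByKey_perm xs k v).mem_iff.mp hq) with heq | hq'
      · rw [heq]; exact le_of_not_gt hk
      · exact hx q hq' 

def pvFoldIns (ps : List (Int × Int)) (init : List (Int × Int)) : List (Int × Int) :=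
  ps.foldl (fun acc p => pvInsertByKey acc p.1 p.2) init

theorem pvFoldIns_perm (ps : List (Int × Int)) (init : List (Int × Int)) :
    (pvFoldIns ps init).Perm (ps ++ init) := by
  induction ps generalizing init with
  | nil => simp [pvFoldIns]
  | cons p ps ih =>
    refine (ih (pvInsertByKey init p.1 p.2)).trans ?_
    refine (List.Perm.append_left ps (pvInsertByKey_perm init p.1 p.2)).trans ?_
    simp only [List.cons_append]
    exact List.perm_middle

theorem pvFoldIns_pairwise (ps : List (Int × Int)) (init : List (Int × Int))
    (h : init.Pairwise (fun p q => p.1 ≤ q.1)) :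
    (pvFoldIns ps init).Pairwise (fun p q => p.1 ≤ q.1) := by
  induction ps generalizing init with
  | nil => simpa [pvFoldIns] using h
  | cons p ps ih => exact ih _ (pvInsertByKey_pairwise init p.1 p.2 h)

theorem populateDiscardPilesAltGo_none (ps : List (Int × Int)) (ordered : List (Int × Int))
    (h : ∃ p ∈ ps, PySem.Int.mod p.2 2 ≠ 0) :
    populateDiscardPilesAltGo ps ordered = [none, none] := by
  induction ps generalizing ordered with
  | nil => simp at h
  | cons p ps ih =>
    obtain ⟨k, v⟩ := p
    obtain ⟨j, hj, hodd⟩ := h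
    rw [populateDiscardPilesAltGo]
    rcases List.mem_cons.mp hj with rfl | hj
    · rw [if_pos hodd]
    · by_cases hk : PySem.Int.mod v 2 ≠ 0
      · rw [if_pos hk]
      · rw [if_neg hk]
        exact ih _ ⟨j, hj, hodd⟩

theorem populateDiscardPilesAltGo_even (ps : List (Int × Int)) (ordered : List (Int × Int))
    (h : ∀ p ∈ ps, PySem.Int.mod p.2 2 = 0) :
    populateDiscardPilesAltGo ps ordered =
      [some ((pvFoldIns ps ordered).flatMap pvG1),
       some ((pvFoldIns ps ordered).flatMap pvG2)] := by
  induction ps generalizing ordered with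
  | nil => simp [populateDiscardPilesAltGo, pvFoldIns, pvEmit_eq]
  | cons p ps ih =>
    obtain ⟨k, v⟩ := p
    rw [populateDiscardPilesAltGo]
    have heven := h (k, v) (List.mem_cons_self ..)
    simp only [heven, ne_eq, not_true_eq_false, not_false_eq_true, if_neg]
    exact ih _ (fun q hq => h q (List.mem_cons_of_mem _ hq))

theorem flatMap_congr_mem {α β : Type} (l : List α) (f g : α → List β)
    (h : ∀ x ∈ l, f x = g x) : l.flatMap f = l.flatMap g := by
  induction l with
  | nil => rfl
  | cons x xs ih =>
    rw [List.flatMap_cons, List.flatMap_cons, h x (List.mem_cons_self ..),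
        ih (fun y hy => h y (List.mem_cons_of_mem _ hy))]

theorem pvModAbs (v : Int) : (PySem.Int.mod |v| 2 = 0) ↔ (PySem.Int.mod v 2 = 0) := by
  rw [PySem.Int.mod_eq_zero_iff_dvd, PySem.Int.mod_eq_zero_iff_dvd]
  exact dvd_abs 2 v

-- ===== VERDICT (by name: the statement is the Claim_ definition above) =====
theorem populateDiscardPiles_spec : Claim_equal_populateDiscardPiles := by
  intro values _
  unfold Spec_populateDiscardPiles populateDiscardPiles populateDiscardPiles_alt
  set d := PySem.Dict.ofList values with hd
  have hnd : d.keys.Nodup := PySem.Dict.nodup_keys_ofList values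
  have hkeys : d.keys = d.items.map Prod.fst := rfl
  have hget : ∀ p ∈ d.items, d.getD p.1 0 = p.2 := by
    rintro ⟨k, v⟩ hp
    exact PySem.Dict.getD_of_mem_items d hp hnd 0
  by_cases hodd : ∃ p ∈ d.items, PySem.Int.mod p.2 2 ≠ 0
  · rw [populateDiscardPilesAltGo_none _ _ hodd]
    apply populateDiscardPilesGo_none
    obtain ⟨p, hp, ho⟩ := hodd
    refine ⟨p.1, by rw [hkeys]; exact List.mem_map_of_mem hp, ?_⟩
    rw [hget p hp]
    intro hc
    exact ho ((pvModAbs p.2).mp hc)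
  · push Not at hodd
    have heven : ∀ p ∈ d.items, PySem.Int.mod p.2 2 = 0 := hodd
    have hevenk : ∀ k ∈ d.keys, PySem.Int.mod |d.getD k 0| 2 = 0 := by
      intro k hk
      rw [hkeys] at hk
      obtain ⟨p, hp, rfl⟩ := List.mem_map.mp hk
      rw [hget p hp, pvModAbs]
      exact heven p hp
    rw [populateDiscardPilesGo_even d d.keys hevenk,
        populateDiscardPilesAltGo_even _ _ heven]
    set fin := pvFoldIns d.items [] with hfin
    have hperm : fin.Perm d.items := by
      simpa using pvFoldIns_perm d.items []
    have hmemfin : ∀ p ∈ fin, p ∈ d.items := fun p hp => hperm.mem_iff.mp hp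
    have hpw : fin.Pairwise (fun p q => p.1 ≤ q.1) := pvFoldIns_pairwise d.items [] (by simp)
    have hsortedkeys : PySem.List.sorted d.keys (fun x => x) false = fin.map Prod.fst := by
      apply PySem.List.sorted_id_eq_of_perm_of_pairwise
      · rw [hkeys]; exact hperm.map Prod.fst
      · exact (List.pairwise_map).mpr hpw
    have hg1 : fin.flatMap pvG1 = fin.flatMap (fun p => pvF1 d p.1) := by
      apply flatMap_congr_mem
      intro p hp
      simp [pvG1, pvF1, hget p (hmemfin p hp)]
    have hg2 : fin.flatMap pvG2 = fin.flatMap (fun p => pvF2 d p.1) := by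
      apply flatMap_congr_mem
      intro p hp
      simp [pvG2, pvF2, hget p (hmemfin p hp)]
    have hf1 : ∀ k, ∀ x ∈ pvF1 d k, x = k := by
      intro k x hx; unfold pvF1 at hx; split at hx <;> simp_all
    have hf2 : ∀ k, ∀ x ∈ pvF2 d k, x = k := by
      intro k x hx; unfold pvF2 at hx; split at hx <;> simp_all
    rw [List.nil_append, List.nil_append,
        sorted_flatMap_keys d (pvF1 d) hf1, sorted_flatMap_keys d (pvF2 d) hf2,
        hsortedkeys, hg1, hg2, List.flatMap_map, List.flatMap_map]
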